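-- pv_equiv track=rewrite | github.com/Skeliaa/INF-221 | Tarea2/main.py | encontrar_superposicion_maxima
-- ===== SOURCE A (Python) =====
-- def encontrar_superposicion_maxima(intervalos):
--     n = len(intervalos)
--     max_superposicion = 0
--
--     for i in range(n - 1):
--         for j in range(i + 1, n):
--             # Verificar si hay superposición antes de calcular la intersección
--             if intervalos[i][1] >= intervalos[j][0] and intervalos[j][1] >= intervalos[i][0]:
--                 interseccion = min(intervalos[i][1], intervalos[j][1]) - max(intervalos[i][0], intervalos[j][0]) + 1
--                 max_superposicion = max(max_superposicion, interseccion)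
--
--     return max_superposicion
-- ===== SOURCE B (Python) =====
-- def encontrar_superposicion_maxima(intervalos):
--     mejor = 0
--     max_fin = None
--     for iv in sorted(intervalos, key=lambda iv: iv[0]):
--         s, e = iv[0], iv[1]
--         if max_fin is not None:
--             mejor = max(mejor, min(max_fin, e) - s + 1)
--         max_fin = e if max_fin is None else max(max_fin, e)
--     return mejor
-- ===== Notes on version B (the rewrite author's own statement) =====
-- stated objective: faster
-- what changed: Replaced the all-pairs double loop by sort-by-start plus a single sweep that keeps the maximum right endpoint seen so far, so the best overlap for each interval is found against that one running maximum instead of against every other interval.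
-- outside the precondition, e.g. on encontrar_superposicion_maxima([(5,)]): A returns 0, B raises IndexError
import Mathlib
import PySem

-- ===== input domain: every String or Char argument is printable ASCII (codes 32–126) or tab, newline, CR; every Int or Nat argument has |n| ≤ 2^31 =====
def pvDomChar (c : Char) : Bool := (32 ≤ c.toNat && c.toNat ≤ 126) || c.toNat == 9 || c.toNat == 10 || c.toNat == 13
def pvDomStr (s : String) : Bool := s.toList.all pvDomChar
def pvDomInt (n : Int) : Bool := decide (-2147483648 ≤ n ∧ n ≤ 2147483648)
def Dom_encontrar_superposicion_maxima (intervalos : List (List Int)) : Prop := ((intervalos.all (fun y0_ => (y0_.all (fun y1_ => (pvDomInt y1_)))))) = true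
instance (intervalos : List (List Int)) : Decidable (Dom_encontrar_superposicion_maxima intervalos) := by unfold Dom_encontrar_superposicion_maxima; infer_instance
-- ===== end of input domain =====

-- B replaces A's all-pairs double loop by sort-by-start plus one sweep over a running
-- maximum right endpoint (objective: faster, O(n log n) instead of O(n^2)).

-- ===== PORT A =====
def encontrar_superposicion_maxima (intervalos : List (List Int)) : Int :=
  let n : Int := intervalos.length
  (PySem.List.pyRange 0 (n - 1)).foldl (fun maxSup i =>
    (PySem.List.pyRange (i + 1) n).foldl (fun maxSup j =>
      if PySem.List.pyGetD (PySem.List.pyGetD intervalos i []) 1 0 ≥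
           PySem.List.pyGetD (PySem.List.pyGetD intervalos j []) 0 0 ∧
         PySem.List.pyGetD (PySem.List.pyGetD intervalos j []) 1 0 ≥
           PySem.List.pyGetD (PySem.List.pyGetD intervalos i []) 0 0 then
        max maxSup
          (min (PySem.List.pyGetD (PySem.List.pyGetD intervalos i []) 1 0)
               (PySem.List.pyGetD (PySem.List.pyGetD intervalos j []) 1 0) -
           max (PySem.List.pyGetD (PySem.List.pyGetD intervalos i []) 0 0)
               (PySem.List.pyGetD (PySem.List.pyGetD intervalos j []) 0 0) + 1)
      else maxSup) maxSup) 0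

-- ===== PORT B =====
def encontrar_superposicion_maxima_alt (intervalos : List (List Int)) : Int :=
  ((PySem.List.sorted intervalos (fun iv => PySem.List.pyGetD iv 0 0)).foldl
    (fun st iv =>
      let s := PySem.List.pyGetD iv 0 0
      let e := PySem.List.pyGetD iv 1 0
      let mejor : Int := match st.2 with
        | none => st.1
        | some f => max st.1 (min f e - s + 1)
      let maxFin : Option Int := match st.2 with
        | none => some e
        | some f => some (max f e)
      (mejor, maxFin))
    ((0 : Int), (none : Option Int))).1

-- ===== PRECONDITION & SPEC =====
-- Pre_ excludes inputs where some interval has fewer than 2 elements: with at least two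
-- intervals the Python A raises IndexError there, and on 0-/1-interval inputs A returns 0
-- without ever reading the intervals while B (which reads every interval) raises IndexError.
def Pre_encontrar_superposicion_maxima (intervalos : List (List Int)) : Prop :=
  ∀ iv ∈ intervalos, 2 ≤ iv.length
instance (intervalos : List (List Int)) : Decidable (Pre_encontrar_superposicion_maxima intervalos) := by unfold Pre_encontrar_superposicion_maxima; infer_instance
def pvWitness_encontrar_superposicion_maxima : List (List Int) := [[1, 3], [2, 5]]

def Spec_encontrar_superposicion_maxima (intervalos : List (List Int)) (out : Int) : Prop := out = encontrar_superposicion_maxima_alt intervalos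
instance (intervalos : List (List Int)) (out : Int) : Decidable (Spec_encontrar_superposicion_maxima intervalos out) := by unfold Spec_encontrar_superposicion_maxima; infer_instance

-- ===== CLAIM (what is proved, stated in full; the proofs are below) =====
def Claim_equal_encontrar_superposicion_maxima : Prop := ∀ (intervalos : List (List Int)), Dom_encontrar_superposicion_maxima intervalos → Pre_encontrar_superposicion_maxima intervalos → Spec_encontrar_superposicion_maxima intervalos (encontrar_superposicion_maxima intervalos)

-- ===== LEMMAS AND PROOFS =====

-- the (start, end) pair A and B read from an interval list (default 0 matches pyGetD's default)
def pvToPair (iv : List Int) : Int × Int :=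
  (PySem.List.pyGetD iv 0 0, PySem.List.pyGetD iv 1 0)

-- the intersection length A computes for a pair of intervals
def pvVV (a b : Int × Int) : Int := min a.2 b.2 - max a.1 b.1 + 1

-- A's inner-loop body on pairs
def pvCondStep (m : Int) (a b : Int × Int) : Int :=
  if a.2 ≥ b.1 ∧ b.2 ≥ a.1 then max m (pvVV a b) else m

-- A's double loop, structurally: each element against the rest of its suffix
def pvTailsFoldC : List (Int × Int) → Int → Int
  | [], m => m
  | p :: Q, m => pvTailsFoldC Q (Q.foldl (fun m q => pvCondStep m p q) m)

-- the multiset of all pairwise intersection values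
def pvPairsVals : List (Int × Int) → List Int
  | [] => []
  | p :: Q => Q.map (pvVV p) ++ pvPairsVals Q

-- B's sweep step on pairs
def pvSweepStep (st : Int × Option Int) (q : Int × Int) : Int × Option Int :=
  match st.2 with
  | none => (st.1, some q.2)
  | some f => (max st.1 (min f q.2 - q.1 + 1), some (max f q.2))

theorem pv_pyRange_one_eq (a b : Int) :
    PySem.List.pyRange a b = (List.range (b - a).toNat).map (fun (k : Nat) => a + (k : Int)) := by
  unfold PySem.List.pyRange
  split_ifs with h1 h2 h3 h4
  · exact absurd h1 (by norm_num)
  · rw [show (b - a + 1 - 1) / 1 = b - a from by omega]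
    show (List.range (b - a).toNat).map (fun (k : Nat) => a + 1 * (k : Int))
        = (List.range (b - a).toNat).map (fun (k : Nat) => a + (k : Int))
    exact List.map_congr_left (fun k _ => by omega)
  · rw [show (b - a).toNat = 0 from by omega]
    rfl
  · exact absurd (by norm_num : (0 : Int) < 1) h2
  · exact absurd (by norm_num : (0 : Int) < 1) h2

theorem pv_foldl_max_absorb (L : List Int) (a b : Int) :
    L.foldl max (max a b) = max a (L.foldl max b) := by
  induction L generalizing b with
  | nil => rfl
  | cons x X ih =>
    simp only [List.foldl_cons, max_assoc]
    exact ih (max b x)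

theorem pv_merge {α : Type} (R : List α) (u w : α → Int) (m : Int) :
    (R.map (fun r => max (u r) (w r))).foldl max m
      = (R.map w).foldl max ((R.map u).foldl max m) := by
  induction R generalizing m with
  | nil => rfl
  | cons r S ih =>
    simp only [List.map_cons, List.foldl_cons]
    have h1 : max m (max (u r) (w r)) = max (w r) (max m (u r)) := by omega
    rw [h1, pv_foldl_max_absorb, ih, ← pv_foldl_max_absorb]
    have h2 : max (w r) ((S.map u).foldl max (max m (u r)))
        = max ((S.map u).foldl max (max m (u r))) (w r) := by omega
    rw [h2]

theorem pv_vv_comm (a b : Int × Int) : pvVV a b = pvVV b a := by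
  unfold pvVV; omega

theorem pv_pairsVals_perm {P P' : List (Int × Int)} (h : P.Perm P') :
    (pvPairsVals P).Perm (pvPairsVals P') := by
  induction h with
  | nil => simp [pvPairsVals]
  | cons x h ih => exact List.Perm.append (h.map _) ih
  | swap a b T =>
    simp only [pvPairsVals, List.map_cons, List.cons_append]
    rw [pv_vv_comm b a]
    exact List.Perm.cons _ (List.perm_append_comm_assoc _ _ _)
  | trans _ _ ih1 ih2 => exact ih1.trans ih2

theorem pv_rangeFold {α : Type} (L : List α) (G : Int → α → Int) (d : α) (m : Int) :
    (List.range L.length).foldl (fun m k => G m (L.getD k d)) m = L.foldl G m := by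
  induction L generalizing m with
  | nil => rfl
  | cons x X ih =>
    simp only [List.length_cons, List.range_succ_eq_map, List.foldl_cons, List.foldl_map,
      List.getD_cons_zero, Nat.succ_eq_add_one, List.getD_cons_succ]
    exact ih (G m x)

theorem pv_dblRange (P : List (Int × Int)) (m : Int) :
    (List.range (P.length - 1)).foldl (fun m i =>
      (List.range (P.length - 1 - i)).foldl (fun m k =>
        pvCondStep m (P.getD i (0, 0)) (P.getD (i + 1 + k) (0, 0))) m) m
    = pvTailsFoldC P m := by
  induction P generalizing m with
  | nil => rfl
  | cons p Q ih =>
    cases Q with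
    | nil => rfl
    | cons q R =>
      have hlen : (p :: q :: R).length - 1 = (q :: R).length := by simp
      rw [hlen]
      have hrs : List.range (q :: R).length = 0 :: (List.range ((q :: R).length - 1)).map Nat.succ := by
        simpa using (List.range_succ_eq_map (n := R.length))
      rw [hrs]
      simp only [List.foldl_cons, List.foldl_map]
      -- first outer iteration (i = 0): fold of p against all of q :: R
      have hfun : (fun (m : Int) (k : Nat) =>
            pvCondStep m ((p :: q :: R).getD 0 (0, 0)) ((p :: q :: R).getD (0 + 1 + k) (0, 0)))
          = (fun (m : Int) (k : Nat) => pvCondStep m p ((q :: R).getD k (0, 0))) := by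
        funext m k
        have hk : 0 + 1 + k = k + 1 := by omega
        rw [hk, List.getD_cons_succ, List.getD_cons_zero]
      have h0 : (List.range ((q :: R).length - 0)).foldl (fun m k =>
          pvCondStep m ((p :: q :: R).getD 0 (0, 0)) ((p :: q :: R).getD (0 + 1 + k) (0, 0))) m
          = (q :: R).foldl (fun m x => pvCondStep m p x) m := by
        rw [Nat.sub_zero, hfun]
        exact pv_rangeFold (q :: R) (fun m x => pvCondStep m p x) (0, 0) m
      rw [h0]
      -- remaining outer iterations: shifted copy of the fold for q :: R
      have hsh : ∀ (m' : Int),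
          (List.range ((q :: R).length - 1)).foldl (fun m i =>
            (List.range ((q :: R).length - Nat.succ i)).foldl (fun m k =>
              pvCondStep m ((p :: q :: R).getD (Nat.succ i) (0, 0))
                ((p :: q :: R).getD (Nat.succ i + 1 + k) (0, 0))) m) m'
          = (List.range ((q :: R).length - 1)).foldl (fun m i =>
            (List.range ((q :: R).length - 1 - i)).foldl (fun m k =>
              pvCondStep m ((q :: R).getD i (0, 0)) ((q :: R).getD (i + 1 + k) (0, 0))) m) m' := by
        intro m'
        apply PySem.List.foldl_congr_mem
        intro acc i hi
        have h1 : Nat.succ i = i + 1 := rfl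
        rw [h1, List.getD_cons_succ,
          show (q :: R).length - (i + 1) = (q :: R).length - 1 - i from by omega]
        apply PySem.List.foldl_congr_mem
        intro acc2 k _
        have h2 : i + 1 + 1 + k = (i + 1 + k) + 1 := by omega
        rw [h2, List.getD_cons_succ]
      rw [hsh]
      conv_rhs => rw [pvTailsFoldC]
      exact ih _

theorem pv_getD_map {α β : Type} (f : α → β) (l : List α) (n : Nat) (d : α) :
    (l.map f).getD n (f d) = f (l.getD n d) := by
  simp only [List.getD_eq_getElem?_getD, List.getElem?_map]
  cases l[n]? <;> rfl

theorem pv_A_eq (l : List (List Int)) :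
    encontrar_superposicion_maxima l = pvTailsFoldC (l.map pvToPair) 0 := by
  have hgm : ∀ t : Nat, (l.map pvToPair).getD t ((0 : Int), (0 : Int)) = pvToPair (l.getD t []) := by
    intro t
    rw [show ((0 : Int), (0 : Int)) = pvToPair [] from rfl]
    exact pv_getD_map pvToPair l t []
  simp only [encontrar_superposicion_maxima]
  rw [← pv_dblRange (l.map pvToPair) 0]
  rw [pv_pyRange_one_eq, List.foldl_map]
  rw [show (((l.length : Int)) - 1 - 0).toNat = (l.map pvToPair).length - 1 from by simp]
  apply PySem.List.foldl_congr_mem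
  intro acc i hi
  rw [pv_pyRange_one_eq, List.foldl_map]
  rw [show ((l.length : Int) - (0 + (i : Int) + 1)).toNat = (l.map pvToPair).length - 1 - i from by
    simp; omega]
  apply PySem.List.foldl_congr_mem
  intro acc2 k _
  rw [show (0 + (i : Int) + 1 + (k : Int)) = ((i + 1 + k : Nat) : Int) from by push_cast; ring]
  rw [show (0 + (i : Int)) = ((i : Nat) : Int) from by omega]
  simp only [PySem.List.pyGetD_natCast]
  rw [hgm i, hgm (i + 1 + k)]
  unfold pvCondStep pvVV pvToPair
  rfl

theorem pv_inner_eq (p : Int × Int) (Q : List (Int × Int)) :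
    ∀ m : Int, 0 ≤ m →
      Q.foldl (fun m q => pvCondStep m p q) m = (Q.map (pvVV p)).foldl max m := by
  induction Q with
  | nil => intro m _; rfl
  | cons q R ih =>
    intro m hm
    simp only [List.foldl_cons, List.map_cons]
    have hstep : pvCondStep m p q = max m (pvVV p q) := by
      unfold pvCondStep pvVV
      split_ifs with h
      · rfl
      · have : min p.2 q.2 - max p.1 q.1 + 1 ≤ 0 := by
          rcases not_and_or.mp h with h1 | h1 <;> omega
        omega
    rw [hstep]
    exact ih _ (by omega)

theorem pv_tailsFoldC_eq (P : List (Int × Int)) :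
    ∀ m : Int, 0 ≤ m → pvTailsFoldC P m = (pvPairsVals P).foldl max m := by
  induction P with
  | nil => intro m _; rfl
  | cons p Q ih =>
    intro m hm
    simp only [pvTailsFoldC, pvPairsVals, List.foldl_append]
    rw [pv_inner_eq p Q m hm]
    exact ih _ (le_trans hm (PySem.List.le_foldl_max (Q.map (pvVV p)) m).1)

theorem pv_sweep (Q : List (Int × Int)) :
    Q.Pairwise (fun a b => a.1 ≤ b.1) → ∀ m f : Int,
    (Q.foldl pvSweepStep (m, some f)).1
      = ((Q.map (fun q => min f q.2 - q.1 + 1)) ++ pvPairsVals Q).foldl max m := by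
  induction Q with
  | nil => intro _ m f; rfl
  | cons q R ih =>
    intro hQ m f
    rcases List.pairwise_cons.mp hQ with ⟨hq, hR⟩
    have hstep : pvSweepStep (m, some f) q
        = (max m (min f q.2 - q.1 + 1), some (max f q.2)) := rfl
    simp only [List.foldl_cons, hstep, List.map_cons, List.cons_append, List.foldl_cons,
      List.foldl_append, pvPairsVals]
    rw [ih hR]
    rw [List.foldl_append]
    rw [show R.map (fun r => min (max f q.2) r.2 - r.1 + 1)
        = R.map (fun r => max (min f r.2 - r.1 + 1) (pvVV q r)) from
      List.map_congr_left (fun r hr => by unfold pvVV; have := hq r hr; omega)]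
    rw [pv_merge]

theorem pv_B_eq (l : List (List Int)) :
    encontrar_superposicion_maxima_alt l
      = (((PySem.List.sorted l (fun iv => PySem.List.pyGetD iv 0 0)).map pvToPair).foldl
          pvSweepStep ((0 : Int), (none : Option Int))).1 := by
  unfold encontrar_superposicion_maxima_alt
  rw [List.foldl_map]
  congr 1
  apply PySem.List.foldl_congr_mem
  intro acc x _
  rcases acc with ⟨mj, fo⟩
  cases fo <;> rfl

theorem pv_pairs_foldl_eq_B (l : List (List Int)) :
    (pvPairsVals (l.map pvToPair)).foldl max 0 = encontrar_superposicion_maxima_alt l := by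
  rw [pv_B_eq]
  have hperm : ((PySem.List.sorted l (fun iv => PySem.List.pyGetD iv 0 0)).map pvToPair).Perm
      (l.map pvToPair) :=
    (PySem.List.sorted_perm l _ false).map pvToPair
  rw [← (pv_pairsVals_perm hperm).foldl_eq 0]
  have hpw : ((PySem.List.sorted l (fun iv => PySem.List.pyGetD iv 0 0)).map pvToPair).Pairwise
      (fun a b => a.1 ≤ b.1) := by
    rw [List.pairwise_map]
    exact PySem.List.sorted_pairwise l _
  cases hP : (PySem.List.sorted l (fun iv => PySem.List.pyGetD iv 0 0)).map pvToPair with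
  | nil => rfl
  | cons p Q =>
    rw [hP] at hpw
    rcases List.pairwise_cons.mp hpw with ⟨hq, hQ⟩
    have h1 : ((p :: Q).foldl pvSweepStep ((0 : Int), (none : Option Int))).1
        = (Q.foldl pvSweepStep ((0 : Int), some p.2)).1 := rfl
    rw [h1, pv_sweep Q hQ 0 p.2]
    simp only [pvPairsVals]
    congr 2
    exact List.map_congr_left (fun r hr => by unfold pvVV; have := hq r hr; omega)

-- ===== VERDICT (by name: the statement is the Claim_ definition above) =====
theorem encontrar_superposicion_maxima_spec : Claim_equal_encontrar_superposicion_maxima := by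
  intro l _ _
  unfold Spec_encontrar_superposicion_maxima
  rw [pv_A_eq l, pv_tailsFoldC_eq _ 0 le_rfl, pv_pairs_foldl_eq_B l]
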